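-- pv_equiv track=rewrite | github.com/AbednAboH/AI_lab4_coEvoW_networks | main.py | sort_for_drawing
-- ===== SOURCE A (Python) =====
-- def sort_for_drawing(depth):
--     curr=depth[0]
--     dep2=[[depth[0]]]
--     d=0
--     for next in depth[1:]:
--         if next[0]<=curr[0]<=next[1] or curr[0] <=next[1]<=curr[1] or next[0]<=curr[1]<=next[1] or curr[0] <=next[0]<=curr[1]:
--             dep2.append([next])
--             curr=next
--             d=d+1
--         else:
--             dep2[d].append(next)
--             curr=next
--
--
--     return dep2
-- ===== SOURCE B (Python) =====
-- def _overlap(a, b):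
--     return b[0] <= a[0] <= b[1] or a[0] <= b[1] <= a[1] or b[0] <= a[1] <= b[1] or a[0] <= b[0] <= a[1]
--
--
-- def sort_for_drawing(depth):
--     n = len(depth)
--     cuts = [0] + [i for i in range(1, n) if _overlap(depth[i - 1], depth[i])] + [n]
--     return [depth[a:b] for a, b in zip(cuts, cuts[1:])]
-- ===== Notes on version B (the rewrite author's own statement) =====
-- stated objective: alternative
-- what changed: A builds the groups incrementally in one stateful loop (tracking curr, the group index d, and appending into dep2[d] or starting a new group); B first computes the list of cut indices where consecutive intervals overlap and then returns the slices of depth between consecutive cuts.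
-- outside the precondition, e.g. on sort_for_drawing([[0], [-1, 1]]): A returns [[[0]], [[-1, 1]]], B returns [[[0]], [[-1, 1]]]
import Mathlib
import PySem

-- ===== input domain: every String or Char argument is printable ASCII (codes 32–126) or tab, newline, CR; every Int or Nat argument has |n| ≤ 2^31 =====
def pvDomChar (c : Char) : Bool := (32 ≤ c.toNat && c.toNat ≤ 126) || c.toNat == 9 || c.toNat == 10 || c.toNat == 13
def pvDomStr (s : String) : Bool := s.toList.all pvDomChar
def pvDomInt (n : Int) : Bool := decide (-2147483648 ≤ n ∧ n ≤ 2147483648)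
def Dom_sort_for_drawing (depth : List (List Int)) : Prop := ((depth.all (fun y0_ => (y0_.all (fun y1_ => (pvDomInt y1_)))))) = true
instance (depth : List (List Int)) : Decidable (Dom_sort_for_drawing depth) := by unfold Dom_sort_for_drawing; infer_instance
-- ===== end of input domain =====

-- B groups the intervals by precomputing the cut indices and slicing, instead of A's
-- stateful loop that appends into dep2[d]; same cost, different decomposition (objective: alternative).

-- ===== PORT A =====
-- A's overlap condition, exact argument order (curr, next); out-of-range endpoint reads
-- (Python IndexError, excluded by Pre_) are modeled by a default of 0.
def ovA (curr next : List Int) : Bool :=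
  (decide (PySem.List.pyGetD next 0 0 ≤ PySem.List.pyGetD curr 0 0) &&
     decide (PySem.List.pyGetD curr 0 0 ≤ PySem.List.pyGetD next 1 0))
  || (decide (PySem.List.pyGetD curr 0 0 ≤ PySem.List.pyGetD next 1 0) &&
       decide (PySem.List.pyGetD next 1 0 ≤ PySem.List.pyGetD curr 1 0))
  || (decide (PySem.List.pyGetD next 0 0 ≤ PySem.List.pyGetD curr 1 0) &&
       decide (PySem.List.pyGetD curr 1 0 ≤ PySem.List.pyGetD next 1 0))
  || (decide (PySem.List.pyGetD curr 0 0 ≤ PySem.List.pyGetD next 0 0) &&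
       decide (PySem.List.pyGetD next 0 0 ≤ PySem.List.pyGetD curr 1 0))

-- dep2[d].append(next): in-place append into the group at index d
def appendAt (xs : List (List (List Int))) (d : Int) (v : List Int) : List (List (List Int)) :=
  match xs with
  | [] => []
  | g :: gs => if d = 0 then (g ++ [v]) :: gs else g :: appendAt gs (d - 1) v

def sort_for_drawing (depth : List (List Int)) : List (List (List Int)) :=
  let curr := PySem.List.pyGetD depth 0 []   -- depth[0]; Pre_ excludes the empty list (IndexError)
  let st := (PySem.List.slice depth (some 1) none).foldl
    (fun (st : List Int × List (List (List Int)) × Int) next =>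
      if ovA st.1 next then (next, st.2.1 ++ [[next]], st.2.2 + 1)
      else (next, appendAt st.2.1 st.2.2 next, st.2.2))
    (curr, [[curr]], 0)
  st.2.1

-- ===== PORT B =====
-- same predicate as _overlap in Source B (argument order (a, b) = (previous, next))
def ovB (a b : List Int) : Bool :=
  (decide (PySem.List.pyGetD b 0 0 ≤ PySem.List.pyGetD a 0 0) &&
     decide (PySem.List.pyGetD a 0 0 ≤ PySem.List.pyGetD b 1 0))
  || (decide (PySem.List.pyGetD a 0 0 ≤ PySem.List.pyGetD b 1 0) &&
       decide (PySem.List.pyGetD b 1 0 ≤ PySem.List.pyGetD a 1 0))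
  || (decide (PySem.List.pyGetD b 0 0 ≤ PySem.List.pyGetD a 1 0) &&
       decide (PySem.List.pyGetD a 1 0 ≤ PySem.List.pyGetD b 1 0))
  || (decide (PySem.List.pyGetD a 0 0 ≤ PySem.List.pyGetD b 0 0) &&
       decide (PySem.List.pyGetD b 0 0 ≤ PySem.List.pyGetD a 1 0))

def sort_for_drawing_alt (depth : List (List Int)) : List (List (List Int)) :=
  let n : Int := depth.length
  let cuts : List Int :=
    [0] ++ (PySem.List.pyRange 1 n 1).filter
      (fun i => ovB (PySem.List.pyGetD depth (i - 1) []) (PySem.List.pyGetD depth i [])) ++ [n]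
  (cuts.zip cuts.tail).map (fun p => PySem.List.slice depth (some p.1) (some p.2))

-- ===== PRECONDITION & SPEC =====
-- Pre_ excludes the empty list (A raises IndexError on depth[0]) and, for lists of length ≥ 2,
-- any interval with fewer than 2 endpoints: on those A almost always raises IndexError, except
-- when a lucky short-circuit of the chained comparisons skips the missing endpoint (the cite in
-- claim.json shows such an excluded input, on which A returns and B agrees).
def Pre_sort_for_drawing (depth : List (List Int)) : Prop :=
  depth ≠ [] ∧ (depth.length = 1 ∨ ∀ l ∈ depth, 2 ≤ l.length)
instance (depth : List (List Int)) : Decidable (Pre_sort_for_drawing depth) := by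
  unfold Pre_sort_for_drawing; infer_instance

def pvWitness_sort_for_drawing : List (List Int) := [[0, 3], [2, 5], [7, 9]]

def Spec_sort_for_drawing (depth : List (List Int)) (out : List (List (List Int))) : Prop := out = sort_for_drawing_alt depth
instance (depth : List (List Int)) (out : List (List (List Int))) : Decidable (Spec_sort_for_drawing depth out) := by unfold Spec_sort_for_drawing; infer_instance

-- ===== CLAIM (what is proved, stated in full; the proofs are below) =====
def Claim_equal_sort_for_drawing : Prop := ∀ (depth : List (List Int)), Dom_sort_for_drawing depth → Pre_sort_for_drawing depth → Spec_sort_for_drawing depth (sort_for_drawing depth)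

-- ===== LEMMAS AND PROOFS =====

-- Common recursive description of the grouping: gAux c rest = (remainder of the group
-- containing c, the later groups), scanning rest with predecessor c.
def gAux (c : List Int) : List (List Int) → List (List Int) × List (List (List Int))
  | [] => ([], [])
  | n :: rest =>
    let p := gAux n rest
    if ovA c n then ([], (n :: p.1) :: p.2) else (n :: p.1, p.2)

-- ---- A side ----

theorem appendAt_snoc (done : List (List (List Int))) (g : List (List Int)) (v : List Int) :
    appendAt (done ++ [g]) (done.length : Int) v = done ++ [g ++ [v]] := by
  induction done with
  | nil => simp [appendAt]
  | cons a t ih =>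
      simp only [List.cons_append, appendAt, List.length_cons]
      have h : ((t.length + 1 : Nat) : Int) ≠ 0 := by exact_mod_cast Nat.succ_ne_zero t.length
      rw [if_neg h]
      have h2 : ((t.length + 1 : Nat) : Int) - 1 = (t.length : Int) := by push_cast; ring
      rw [h2, ih]

theorem A_loop (rest : List (List Int)) :
    ∀ (c : List Int) (done : List (List (List Int))) (g : List (List Int)),
    (rest.foldl
      (fun (st : List Int × List (List (List Int)) × Int) next =>
        if ovA st.1 next then (next, st.2.1 ++ [[next]], st.2.2 + 1)
        else (next, appendAt st.2.1 st.2.2 next, st.2.2))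
      (c, done ++ [g], (done.length : Int))).2.1
      = done ++ (g ++ (gAux c rest).1) :: (gAux c rest).2 := by
  induction rest with
  | nil => intro c done g; simp [gAux]
  | cons n rest ih =>
      intro c done g
      simp only [List.foldl_cons, gAux]
      by_cases h : ovA c n
      · simp only [h, if_true]
        have e2 : ((done.length : Int) + 1) = (((done ++ [g]).length : Nat) : Int) := by
          simp
        have e1 : done ++ [g] ++ [[n]] = (done ++ [g]) ++ [([] : List (List Int)) ++ [n]] := by simp
        rw [e2, e1, ih n (done ++ [g]) ([] ++ [n])]
        simp
      · simp only [h, Bool.false_eq_true, if_false]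
        rw [appendAt_snoc, ih n done (g ++ [n])]
        simp

theorem A_eq (x : List Int) (rest : List (List Int)) :
    sort_for_drawing (x :: rest) = (x :: (gAux x rest).1) :: (gAux x rest).2 := by
  unfold sort_for_drawing
  rw [PySem.List.slice_from_one]
  simp only [PySem.List.pyGetD]
  have h0 := A_loop rest x [] [x]
  simpa using h0

-- ---- B side ----

-- cut indices, in Nat form
def cutsN (d : List (List Int)) : List Nat :=
  (List.range' 1 (d.length - 1)).filter
    (fun i => ovA (d.getD (i - 1) []) (d.getD i []))

-- the slices between consecutive cut positions
def chop (d : List (List Int)) : List Nat → List (List (List Int))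
  | a :: b :: t => ((d.drop a).take (b - a)) :: chop d (b :: t)
  | _ => []

theorem ovB_eq_ovA : ovB = ovA := rfl

theorem chop_eq_zip (d : List (List Int)) (l : List Nat) :
    chop d l = (l.zip l.tail).map (fun p => (d.drop p.1).take (p.2 - p.1)) := by
  induction l with
  | nil => simp [chop]
  | cons a t ih =>
      cases t with
      | nil => simp [chop]
      | cons b t' => simp [chop, ih]

theorem chop_shift (x : List Int) (d : List (List Int)) (l : List Nat) :
    chop (x :: d) (l.map (· + 1)) = chop d l := by
  induction l with
  | nil => simp [chop]
  | cons a t ih =>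
      cases t with
      | nil => simp [chop]
      | cons b t' =>
          simp only [List.map_cons, chop, List.drop_succ_cons, Nat.add_sub_add_right]
          rw [show (b + 1) :: t'.map (· + 1) = (b :: t').map (· + 1) from by simp, ih]

theorem cutsN_cons (x y : List Int) (r : List (List Int)) :
    cutsN (x :: y :: r) =
      (if ovA x y then [1] else []) ++ (cutsN (y :: r)).map (· + 1) := by
  unfold cutsN
  simp only [List.length_cons, Nat.add_sub_cancel]
  rw [List.range'_succ, List.filter_cons]
  have hr : List.range' 2 r.length = (List.range' 1 r.length).map (· + 1) := by
    rw [List.range'_eq_map_range, List.range'_eq_map_range, List.map_map]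
    apply List.map_congr_left; intro k _; simp; omega
  rw [hr, List.filter_map]
  have hpred : ∀ k ∈ List.range' 1 r.length,
      ((fun i => ovA ((x :: y :: r).getD (i - 1) []) ((x :: y :: r).getD i [])) ∘ (· + 1)) k
      = (fun i => ovA ((y :: r).getD (i - 1) []) ((y :: r).getD i [])) k := by
    intro k hk
    rw [List.mem_range'_1] at hk
    simp only [Function.comp]
    cases k with
    | zero => omega
    | succ m => simp
  rw [List.filter_congr hpred]
  by_cases h : ovA x y <;> simp [h]

theorem B_chop (rest : List (List Int)) : ∀ (x : List Int),
    chop (x :: rest) (0 :: cutsN (x :: rest) ++ [(x :: rest).length])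
      = (x :: (gAux x rest).1) :: (gAux x rest).2 := by
  induction rest with
  | nil => intro x; simp [cutsN, chop, gAux]
  | cons y r ih =>
      intro x
      rw [cutsN_cons]
      obtain ⟨c, cs, hccs⟩ : ∃ c cs, cutsN (y :: r) ++ [(y :: r).length] = c :: cs := by
        cases cutsN (y :: r) <;> exact ⟨_, _, rfl⟩
      by_cases h : ovA x y
      · have e : (0 :: ((if ovA x y then [1] else []) ++ (cutsN (y :: r)).map (· + 1)))
              ++ [(x :: y :: r).length]
            = 0 :: ((0 :: (cutsN (y :: r) ++ [(y :: r).length])).map (· + 1)) := by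
          simp [h]
        rw [show (0 :: ((if ovA x y then [1] else []) ++ (cutsN (y :: r)).map (· + 1))) ++ [(x :: y :: r).length] = 0 :: (((if ovA x y then [1] else []) ++ (cutsN (y :: r)).map (· + 1)) ++ [(x :: y :: r).length]) from rfl] at e ⊢
        rw [e]
        rw [show ((0 :: (cutsN (y :: r) ++ [(y :: r).length])).map (· + 1)) = 1 :: ((cutsN (y :: r) ++ [(y :: r).length]).map (· + 1)) from by simp]
        show ((x :: y :: r).drop 0).take (1 - 0) :: chop (x :: y :: r) (1 :: _) = _
        rw [show (1 : Nat) :: ((cutsN (y :: r) ++ [(y :: r).length]).map (· + 1)) = ((0 :: (cutsN (y :: r) ++ [(y :: r).length])).map (· + 1)) from by simp]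
        rw [chop_shift]
        rw [show (0 : Nat) :: (cutsN (y :: r) ++ [(y :: r).length]) = 0 :: cutsN (y :: r) ++ [(y :: r).length] from by simp]
        rw [ih y]
        simp [gAux, h]
      · have e : (0 :: ((if ovA x y then [1] else []) ++ (cutsN (y :: r)).map (· + 1)))
              ++ [(x :: y :: r).length]
            = 0 :: (((cutsN (y :: r) ++ [(y :: r).length]).map (· + 1))) := by
          simp [h]
        rw [show (0 :: ((if ovA x y then [1] else []) ++ (cutsN (y :: r)).map (· + 1))) ++ [(x :: y :: r).length] = 0 :: (((if ovA x y then [1] else []) ++ (cutsN (y :: r)).map (· + 1)) ++ [(x :: y :: r).length]) from rfl] at e ⊢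
        rw [e, hccs]
        have hih := ih y
        rw [show (0 : Nat) :: cutsN (y :: r) ++ [(y :: r).length] = 0 :: (cutsN (y :: r) ++ [(y :: r).length]) from by simp, hccs] at hih
        -- hih : chop (y :: r) (0 :: c :: cs) = (y :: (gAux y r).1) :: (gAux y r).2
        have hih1 : ((y :: r).take c) = y :: (gAux y r).1 ∧ chop (y :: r) (c :: cs) = (gAux y r).2 := by
          have : chop (y :: r) (0 :: c :: cs) = ((y :: r).take c) :: chop (y :: r) (c :: cs) := by
            simp [chop]
          rw [this] at hih
          exact ⟨(List.cons.injEq _ _ _ _).mp hih |>.1, (List.cons.injEq _ _ _ _).mp hih |>.2⟩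
        rw [show ((c :: cs).map (· + 1)) = (c+1) :: cs.map (· + 1) from by simp]
        show ((x :: y :: r).drop 0).take ((c+1) - 0) :: chop (x :: y :: r) ((c+1) :: cs.map (· + 1)) = _
        rw [show (c+1) :: cs.map (· + 1) = (c :: cs).map (· + 1) from by simp, chop_shift]
        rw [hih1.2]
        simp only [List.drop_zero, Nat.sub_zero, List.take_succ_cons, hih1.1]
        simp [gAux, h]

theorem pred_bridge (d : List (List Int)) (k : Nat) :
    ovB (PySem.List.pyGetD d ((1 + (k : Int)) - 1) []) (PySem.List.pyGetD d (1 + (k : Int)) [])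
      = ovA (d.getD (1 + k - 1) []) (d.getD (1 + k) []) := by
  rw [ovB_eq_ovA]
  have e1 : (1 + (k : Int)) - 1 = ((k : Nat) : Int) := by ring
  have e2 : (1 + (k : Int)) = (((1 + k : Nat)) : Int) := by push_cast; ring
  rw [e1, e2, PySem.List.pyGetD_natCast, PySem.List.pyGetD_natCast]
  simp

theorem B_eq (d : List (List Int)) :
    sort_for_drawing_alt d = chop d (0 :: cutsN d ++ [d.length]) := by
  have h1 : PySem.List.pyRange 1 (d.length : Int) 1
      = (List.range (d.length - 1)).map (fun k : Nat => (1 : Int) + k) := by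
    rw [PySem.List.pyRange_one]
    congr 1
    · congr 1
      omega
  have hmid :
      (((PySem.List.pyRange 1 (d.length : Int) 1)).filter
          (fun i => ovB (PySem.List.pyGetD d (i - 1) []) (PySem.List.pyGetD d i [])))
        = (cutsN d).map (fun k : Nat => (k : Int)) := by
    rw [h1, List.filter_map]
    unfold cutsN
    rw [List.range'_eq_map_range, List.filter_map, List.map_map]
    have hfc :
        (List.range (d.length - 1)).filter
            ((fun i => ovB (PySem.List.pyGetD d (i - 1) []) (PySem.List.pyGetD d i [])) ∘ (fun k : Nat => (1 : Int) + k))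
          = (List.range (d.length - 1)).filter
            ((fun i => ovA (d.getD (i - 1) []) (d.getD i [])) ∘ (fun x => 1 + x)) :=
      List.filter_congr (fun k _ => by
        simp only [Function.comp]
        exact pred_bridge d k)
    rw [hfc]
    apply List.map_congr_left
    intro k _
    simp only [Function.comp]
    push_cast
    ring
  unfold sort_for_drawing_alt
  rw [chop_eq_zip]
  show ((((0 : Int) :: (((PySem.List.pyRange 1 (d.length : Int) 1)).filter
          (fun i => ovB (PySem.List.pyGetD d (i - 1) []) (PySem.List.pyGetD d i [])) ++ [(d.length : Int)])).zip
      ((0 : Int) :: (((PySem.List.pyRange 1 (d.length : Int) 1)).filter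
          (fun i => ovB (PySem.List.pyGetD d (i - 1) []) (PySem.List.pyGetD d i [])) ++ [(d.length : Int)])).tail).map
        (fun p => PySem.List.slice d (some p.1) (some p.2))) = _
  rw [hmid]
  have hfull : (0 : Int) :: ((cutsN d).map (fun k : Nat => (k : Int)) ++ [(d.length : Int)])
      = (0 :: cutsN d ++ [d.length]).map (fun k : Nat => (k : Int)) := by
    simp
  rw [hfull]
  rw [show ((0 :: cutsN d ++ [d.length]).map (fun k : Nat => (k : Int))).tail
        = ((0 :: cutsN d ++ [d.length]).tail).map (fun k : Nat => (k : Int)) from by simp]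
  rw [List.zip_map, List.map_map]
  apply List.map_congr_left
  intro p _
  simp only [Function.comp, Prod.map]
  rw [PySem.List.slice_natCast]

-- ===== VERDICT (by name: the statement is the Claim_ definition above) =====
theorem sort_for_drawing_spec : Claim_equal_sort_for_drawing := by
  intro depth hDom hPre
  unfold Spec_sort_for_drawing
  obtain ⟨hne, -⟩ := hPre
  cases depth with
  | nil => exact absurd rfl hne
  | cons x rest => rw [A_eq, B_eq, B_chop]
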